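-- pv_equiv track=rewrite | github.com/wrightkennedy/chronAm-project | app.py | _format_year_summary
-- ===== SOURCE A (Python) =====
-- def _format_year_summary(years):
--     if not years:
--         return "Years available: none"
--
--     parts = []
--     start = prev = years[0]
--     for y in years[1:]:
--         if y == prev + 1:
--             prev = y
--             continue
--         parts.append((start, prev))
--         start = prev = y
--     parts.append((start, prev))
--
--     text_parts = []
--     for start, end in parts:
--         if start == end:
--             text_parts.append(str(start))
--         else:
--             text_parts.append(f"{start}-{end}")
--     return "Years available: " + ", ".join(text_parts)
-- ===== SOURCE B (Python) =====
-- def _format_year_summary(years):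
--     if not years:
--         return "Years available: none"
--     rev_runs = []  # runs of consecutive years, most recent run last; built right-to-left
--     for y in reversed(years):
--         if rev_runs and rev_runs[-1][0] == y + 1:
--             rev_runs[-1] = (y, rev_runs[-1][1])
--         else:
--             rev_runs.append((y, y))
--     texts = [str(s) if s == e else f"{s}-{e}" for s, e in reversed(rev_runs)]
--     return "Years available: " + ", ".join(texts)
-- ===== Notes on version B (the rewrite author's own statement) =====
-- stated objective: alternative
-- what changed: B replaces A's forward state-machine loop (parts/start/prev accumulator) with a right-to-left fold over reversed(years) that builds the run list back-to-front by extending or prepending the most recent run.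
import Mathlib
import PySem

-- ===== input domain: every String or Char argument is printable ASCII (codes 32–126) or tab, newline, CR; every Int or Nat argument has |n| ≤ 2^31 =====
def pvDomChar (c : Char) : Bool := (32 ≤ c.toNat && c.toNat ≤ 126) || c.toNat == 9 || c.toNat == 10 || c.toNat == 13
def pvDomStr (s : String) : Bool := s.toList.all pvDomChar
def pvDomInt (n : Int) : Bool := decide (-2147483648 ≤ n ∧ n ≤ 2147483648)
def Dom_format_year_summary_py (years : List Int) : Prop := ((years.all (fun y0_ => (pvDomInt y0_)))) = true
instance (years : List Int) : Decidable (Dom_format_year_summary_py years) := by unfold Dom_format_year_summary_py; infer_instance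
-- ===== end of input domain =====

-- B builds the run list back-to-front with a fold over the reversed list, instead of A's forward prev/start state machine; same O(n) cost (objective: alternative).

-- ===== PORT A =====
def format_year_summary_py (years : List Int) : String :=
  match years with
  | [] => "Years available: none"
  | y0 :: rest =>
    -- start = prev = years[0]; loop over years[1:] with state (parts, start, prev)
    let st := rest.foldl (fun (acc : List (Int × Int) × Int × Int) y =>
      if y = acc.2.2 + 1 then (acc.1, acc.2.1, y)
      else (acc.1 ++ [(acc.2.1, acc.2.2)], y, y)) ([], y0, y0)
    let parts := st.1 ++ [(st.2.1, st.2.2)]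
    let textParts := parts.map (fun p =>
      if p.1 = p.2 then PySem.Int.toStr p.1
      else PySem.Int.toStr p.1 ++ "-" ++ PySem.Int.toStr p.2)
    "Years available: " ++ PySem.Str.join ", " textParts

-- ===== PORT B =====
-- one step of B's loop over reversed(years); the Lean list holds python's rev_runs
-- reversed (head = rev_runs[-1], the earliest run found so far), so the final
-- `reversed(rev_runs)` is the fold result itself.
def bStep (acc : List (Int × Int)) (y : Int) : List (Int × Int) :=
  match acc with
  | (s, e) :: rest => if s = y + 1 then (y, e) :: rest else (y, y) :: (s, e) :: rest
  | [] => [(y, y)]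

def format_year_summary_py_alt (years : List Int) : String :=
  if years = [] then "Years available: none"
  else
    let runs := years.reverse.foldl bStep []
    let texts := runs.map (fun p =>
      if p.1 = p.2 then PySem.Int.toStr p.1
      else PySem.Int.toStr p.1 ++ "-" ++ PySem.Int.toStr p.2)
    "Years available: " ++ PySem.Str.join ", " texts

-- ===== PRECONDITION & SPEC =====
def Spec_format_year_summary_py (years : List Int) (out : String) : Prop := out = format_year_summary_py_alt years
instance (years : List Int) (out : String) : Decidable (Spec_format_year_summary_py years out) := by unfold Spec_format_year_summary_py; infer_instance

-- ===== CLAIM (what is proved, stated in full; the proofs are below) =====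
def Claim_equal_format_year_summary_py : Prop := ∀ (years : List Int), Dom_format_year_summary_py years → Spec_format_year_summary_py years (format_year_summary_py years)

-- ===== LEMMAS AND PROOFS =====

-- the list of (start, end) runs produced from current run (s, p) followed by ys
def runsA (s p : Int) : List Int → List (Int × Int)
  | [] => [(s, p)]
  | y :: ys => if y = p + 1 then runsA s y ys else (s, p) :: runsA y y ys

-- end of the current run started with previous element p
def endA (p : Int) : List Int → Int
  | [] => p
  | y :: ys => if y = p + 1 then endA y ys else p

-- the runs after the current one
def restA (p : Int) : List Int → List (Int × Int)
  | [] => []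
  | y :: ys => if y = p + 1 then restA y ys else runsA y y ys

theorem runsA_decomp (ys : List Int) : ∀ s p, runsA s p ys = (s, endA p ys) :: restA p ys := by
  induction ys with
  | nil => intro s p; simp [runsA, endA, restA]
  | cons y ys ih =>
    intro s p
    by_cases h : y = p + 1 <;> simp [runsA, endA, restA, h, ih]

theorem foldlA (ys : List Int) : ∀ (parts : List (Int × Int)) (s p : Int),
    (let st := ys.foldl (fun (acc : List (Int × Int) × Int × Int) y =>
        if y = acc.2.2 + 1 then (acc.1, acc.2.1, y)
        else (acc.1 ++ [(acc.2.1, acc.2.2)], y, y)) (parts, s, p)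
     st.1 ++ [(st.2.1, st.2.2)]) = parts ++ runsA s p ys := by
  induction ys with
  | nil => intro parts s p; simp [runsA]
  | cons y ys ih =>
    intro parts s p
    by_cases h : y = p + 1 <;> simp [List.foldl_cons, runsA, h, ih]

theorem runsB_eq (ys : List Int) : ∀ y0 : Int,
    (y0 :: ys).foldr (fun y acc => bStep acc y) [] = runsA y0 y0 ys := by
  induction ys with
  | nil => intro y0; simp [bStep, runsA]
  | cons y1 ys ih =>
    intro y0
    have h1 : (y0 :: y1 :: ys).foldr (fun y acc => bStep acc y) []
        = bStep ((y1 :: ys).foldr (fun y acc => bStep acc y) []) y0 := rfl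
    rw [h1, ih y1, runsA_decomp ys y1 y1, runsA]
    by_cases h : y1 = y0 + 1 <;>
      simp [bStep, h, runsA_decomp ys]

-- ===== VERDICT (by name: the statement is the Claim_ definition above) =====
theorem format_year_summary_py_spec : Claim_equal_format_year_summary_py := by
  intro years _
  unfold Spec_format_year_summary_py format_year_summary_py format_year_summary_py_alt
  match years with
  | [] => rfl
  | y0 :: rest =>
    simp only [reduceCtorEq, if_false, List.foldl_reverse]
    rw [show ((y0 :: rest).foldr (fun y acc => bStep acc y) []) = runsA y0 y0 rest from runsB_eq rest y0]
    rw [show _ = ([] : List (Int × Int)) ++ runsA y0 y0 rest from foldlA rest [] y0 y0]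
    simp
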